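-- pv_equiv track=rewrite | github.com/collinsakuma/LeetCode | Problems/1624. Largest Substring Between Two Equal Characters/largest_substring.py | maxLengthBetweenEqualCharacterTwo
-- ===== SOURCE A (Python) =====
-- def maxLengthBetweenEqualCharacterTwo(s):
--     first_dict = {} # dictionary to keep track of letter that have been iterated over already
--     ans = -1 # set default answer to -1 to be returned if no matching pairs are found
--
--     for i in range(len(s)): # loop though range of s looking for letter already in the dict, set new answer if new longer length has been found
--         if s[i] in first_dict:
--             ans = max(ans, i - first_dict[s[i]] - 1)
--         else:
--             first_dict[s[i]] = i
--
--     return ans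
-- ===== SOURCE B (Python) =====
-- def maxLengthBetweenEqualCharacterTwo(s):
--     # per distinct character: span between its first and last occurrence
--     return max((s.rfind(c) - s.find(c) - 1 for c in set(s)), default=-1)
-- ===== Notes on version B (the rewrite author's own statement) =====
-- stated objective: idiomatic
-- what changed: Replaces the forward scan with a first-occurrence dict and running max by taking the max of s.rfind(c)-s.find(c)-1 over the distinct characters of s (default -1).
import Mathlib
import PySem

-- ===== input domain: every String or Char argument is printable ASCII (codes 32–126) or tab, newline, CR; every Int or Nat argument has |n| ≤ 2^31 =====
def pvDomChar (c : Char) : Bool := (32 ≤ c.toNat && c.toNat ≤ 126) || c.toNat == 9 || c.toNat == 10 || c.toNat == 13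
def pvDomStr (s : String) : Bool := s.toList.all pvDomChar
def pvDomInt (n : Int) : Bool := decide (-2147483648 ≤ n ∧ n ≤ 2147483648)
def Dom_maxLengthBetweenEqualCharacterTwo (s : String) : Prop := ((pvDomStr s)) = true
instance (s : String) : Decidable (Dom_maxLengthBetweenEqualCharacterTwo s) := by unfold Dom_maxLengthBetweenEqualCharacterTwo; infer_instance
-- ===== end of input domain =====

-- B replaces A's forward scan with a dict of first occurrences by the max of rfind(c)-find(c)-1
-- over the distinct characters (idiomatic one-liner); measured faster in a timing run.

-- ===== PORT A =====
-- A: one forward pass; dict maps each character to its first index; on a repeat, update ans.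
def maxLengthBetweenEqualCharacterTwo (s : String) : Int :=
  let l := s.toList
  -- i ranges over range(len(s)), so s[i] is always in range: pyGetD is exact here
  let r := (PySem.List.pyRange 0 (PySem.Str.len s) 1).foldl
    (fun (st : PySem.Dict Char Int × Int) (i : Int) =>
      if st.1.contains (PySem.List.pyGetD l i ' ') then
        (st.1, max st.2 (i - st.1.getD (PySem.List.pyGetD l i ' ') 0 - 1))
      else
        (st.1.insert (PySem.List.pyGetD l i ' ') i, st.2))
    (PySem.Dict.empty, -1)
  r.2

-- ===== PORT B =====
-- B: max((s.rfind(c) - s.find(c) - 1 for c in set(s)), default=-1)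
def maxLengthBetweenEqualCharacterTwo_alt (s : String) : Int :=
  match (PySem.Set.ofList s.toList).map
      (fun c => PySem.Str.rfind s (String.ofList [c]) - PySem.Str.find s (String.ofList [c]) - 1) with
  | [] => -1                  -- default=-1
  | x :: t => t.foldl max x   -- max(iterable)

-- ===== PRECONDITION & SPEC =====
def Spec_maxLengthBetweenEqualCharacterTwo (s : String) (out : Int) : Prop := out = maxLengthBetweenEqualCharacterTwo_alt s
instance (s : String) (out : Int) : Decidable (Spec_maxLengthBetweenEqualCharacterTwo s out) := by unfold Spec_maxLengthBetweenEqualCharacterTwo; infer_instance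

-- ===== CLAIM (what is proved, stated in full; the proofs are below) =====
def Claim_equal_maxLengthBetweenEqualCharacterTwo : Prop := ∀ (s : String), Dom_maxLengthBetweenEqualCharacterTwo s → Spec_maxLengthBetweenEqualCharacterTwo s (maxLengthBetweenEqualCharacterTwo s)

-- ===== LEMMAS AND PROOFS =====

-- first index of c in l (l.length+junk when absent; = length of the non-c prefix)
def fI : List Char → Char → Nat
  | [], _ => 0
  | a :: t, c => if a = c then 0 else fI t c + 1

-- last index of c in l (meaningful when c ∈ l)
def lI : List Char → Char → Nat
  | [], _ => 0
  | a :: t, c => if c ∈ t then lI t c + 1 else if a = c then 0 else 0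

theorem fI_append_left {l t : List Char} {c : Char} (h : c ∈ l) : fI (l ++ t) c = fI l c := by
  induction l with
  | nil => cases h
  | cons a l ih =>
    simp only [List.cons_append, fI]
    rcases List.mem_cons.1 h with h | h
    · simp [h]
    · by_cases hac : a = c <;> simp [hac, ih h]

theorem fI_append_right {l : List Char} {c : Char} (h : c ∉ l) (t : List Char) :
    fI (l ++ t) c = l.length + fI t c := by
  induction l with
  | nil => simp
  | cons a l ih =>
    have hac : a ≠ c := fun e => h (e ▸ List.mem_cons_self ..)
    have : c ∉ l := fun e => h (List.mem_cons_of_mem _ e)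
    simp only [List.cons_append, fI, hac, if_false, ih this, List.length_cons]
    omega

theorem lI_append_self (l : List Char) (c : Char) : lI (l ++ [c]) c = l.length := by
  induction l with
  | nil => simp [lI]
  | cons a l ih => simp [lI, ih]

theorem lI_append_ne {b c : Char} (h : b ≠ c) (l : List Char) : lI (l ++ [b]) c = lI l c := by
  induction l with
  | nil => simp [lI, Ne.symm h]
  | cons a l ih =>
    by_cases hc : c ∈ l
    · simp [lI, hc, ih, Ne.symm h]
    · simp [lI, hc, ih, Ne.symm h]

theorem lI_lt_length {l : List Char} {c : Char} (h : c ∈ l) : lI l c < l.length := by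
  induction l with
  | nil => cases h
  | cons a l ih =>
    simp only [lI, List.length_cons]
    by_cases hc : c ∈ l
    · have := ih hc
      simp only [hc, if_true]
      omega
    · simp only [hc, if_false]
      split <;> omega

theorem fI_le_lI {l : List Char} {c : Char} (h : c ∈ l) : fI l c ≤ lI l c := by
  induction l with
  | nil => cases h
  | cons a l ih =>
    by_cases hc : c ∈ l
    · by_cases hac : a = c <;> simp [fI, lI, hac, hc, ih hc] <;> omega
    · have : a = c := by rcases List.mem_cons.1 h with h | h; exact h.symm; exact absurd h hc
      simp [fI, lI, this, hc]

-- Python find/rfind on a single character, characterised by fI / lI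
theorem find_go_singleton (c : Char) : ∀ (t : List Char) (k : Nat),
    PySem.Chars.find.go [c] t k = if c ∈ t then ((k : Int) + fI t c) else -1 := by
  intro t
  induction t with
  | nil => intro k; simp [PySem.Chars.find.go]
  | cons a t ih =>
    intro k
    by_cases hac : c = a
    · subst hac
      simp [PySem.Chars.find.go, List.isPrefixOf, fI]
    · have h1 : ([c].isPrefixOf (a :: t)) = false := by
        simp [List.isPrefixOf]; exact hac
      simp only [PySem.Chars.find.go, h1, Bool.false_eq_true, if_false, ih]
      have hm : (c ∈ a :: t) = (c ∈ t) := by simp [List.mem_cons, hac]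
      by_cases hct : c ∈ t
      · simp [hct, hac, Ne.symm hac, fI]; push_cast; ring
      · simp [hct, hac, Ne.symm hac]

theorem find_singleton {l : List Char} {c : Char} (h : c ∈ l) :
    PySem.Chars.find l [c] = (fI l c : Int) := by
  simp [PySem.Chars.find, find_go_singleton, h]

theorem prefix_singleton (c : Char) (l : List Char) :
    ([c].isPrefixOf l) = (l.head? == some c) := by
  cases l with
  | nil => simp [List.isPrefixOf]
  | cons a t => simp [List.isPrefixOf, BEq.comm]

theorem rfind_go_singleton (s : List Char) (c : Char) : ∀ (j : Nat),
    PySem.Chars.rfind.go s [c] j =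
      if c ∈ s.take (j+1) then ((lI (s.take (j+1)) c : Nat) : Int) else -1 := by
  intro j
  induction j with
  | zero =>
    cases s with
    | nil => simp [PySem.Chars.rfind.go]
    | cons a t =>
      by_cases hac : a = c
      · simp [PySem.Chars.rfind.go, prefix_singleton, hac, lI]
      · simp [PySem.Chars.rfind.go, prefix_singleton, hac, Ne.symm hac, lI]
  | succ j ih =>
    by_cases hlt : j + 1 < s.length
    · have hdrop : s.drop (j+1) = s[j+1] :: s.drop (j+2) := List.drop_eq_getElem_cons hlt
      have htake : s.take (j+2) = s.take (j+1) ++ [s[j+1]] := by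
        rw [List.take_succ]; simp [List.getElem?_eq_getElem hlt]
      by_cases hc : s[j+1] = c
      · have hpre : ([c].isPrefixOf (s.drop (j+1))) = true := by
          rw [hdrop, prefix_singleton]; simp [hc]
        have hmem : c ∈ s.take (j+2) := by rw [htake, hc]; simp
        simp only [PySem.Chars.rfind.go, hpre, if_true, htake, hc, hmem, lI_append_self]
        have : (s.take (j+1)).length = j + 1 := List.length_take_of_le (by omega)
        simp [this]
      · have hpre : ([c].isPrefixOf (s.drop (j+1))) = false := by
          rw [hdrop, prefix_singleton]
          simp only [List.head?_cons]
          exact decide_eq_false (by simpa using hc)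
        simp only [PySem.Chars.rfind.go, hpre, Bool.false_eq_true, if_false, ih, htake,
          lI_append_ne hc]
        have hmm : (c ∈ List.take (j+1) s ++ [s[j+1]]) ↔ (c ∈ List.take (j+1) s) := by
          simp only [List.mem_append, List.mem_singleton]
          exact or_iff_left (fun h => hc h.symm)
        rw [if_congr hmm rfl rfl]
    · have hdrop : s.drop (j+1) = [] := List.drop_of_length_le (by omega)
      have htake : s.take (j+2) = s.take (j+1) := by
        rw [List.take_of_length_le (by omega), List.take_of_length_le (by omega)]
      simp only [PySem.Chars.rfind.go, hdrop, htake, ih]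
      simp [List.isPrefixOf]

theorem rfind_singleton {l : List Char} {c : Char} (h : c ∈ l) :
    PySem.Chars.rfind l [c] = (lI l c : Int) := by
  have htake : l.take (l.length + 1) = l := List.take_of_length_le (by omega)
  cases hl : l.length with
  | zero => cases l; cases h; simp at hl
  | succ n =>
    have := rfind_go_singleton l c l.length
    rw [PySem.Chars.rfind, this, htake, if_pos h]

-- running max commutes with a pending element
theorem foldl_max_comm : ∀ (v : List Int) (b x : Int), v.foldl max (max b x) = max (v.foldl max b) x := by
  intro v
  induction v with
  | nil => intro b x; simp
  | cons a v ih =>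
    intro b x
    simp only [List.foldl_cons]
    rw [max_right_comm, ih]

-- max over a list where exactly one (nodup) element grew, vs max-then-update
theorem foldl_max_replace_one {xs : List Char} {a : Char} (hnd : xs.Nodup) (ha : a ∈ xs)
    {g g' : Char → Int} (hgg : ∀ c ∈ xs, c ≠ a → g' c = g c) (hle : g a ≤ g' a) :
    ∀ i : Int, (xs.map g').foldl max i = max ((xs.map g).foldl max i) (g' a) := by
  induction xs with
  | nil => cases ha
  | cons x t ih =>
    intro i
    have hx : x ∉ t := (List.nodup_cons.1 hnd).1
    have hnd' : t.Nodup := (List.nodup_cons.1 hnd).2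
    by_cases hxa : x = a
    · subst hxa
      have hmap : t.map g' = t.map g :=
        List.map_congr_left (fun c hc => hgg c (List.mem_cons_of_mem _ hc) (fun e => hx (e ▸ hc)))
      simp only [List.map_cons, List.foldl_cons, hmap, foldl_max_comm]
      rw [max_assoc, max_eq_right hle]
    · have ha' : a ∈ t := by rcases List.mem_cons.1 ha with h | h; exact absurd h.symm hxa; exact h
      have hgx : g' x = g x := hgg x (List.mem_cons_self ..) hxa
      simp only [List.map_cons, List.foldl_cons, hgx]
      exact ih hnd' ha' (fun c hc hca => hgg c (List.mem_cons_of_mem _ hc) hca) (max i (g x))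

theorem foldl_max_neg_one_cons {x : Int} (t : List Int) (h : -1 ≤ x) :
    (x :: t).foldl max (-1) = t.foldl max x := by
  simp [List.foldl_cons, max_eq_right h]

-- the common value: max over distinct characters of (last - first - 1), default -1
def Mspec (l : List Char) : Int :=
  ((PySem.Set.ofList l).map (fun c => (lI l c : Int) - (fI l c : Int) - 1)).foldl max (-1)

theorem ofList_append_singleton (l : List Char) (a : Char) :
    PySem.Set.ofList (l ++ [a]) =
      if a ∈ l then PySem.Set.ofList l else PySem.Set.ofList l ++ [a] := by
  rw [PySem.Set.ofList_eq_foldl, List.foldl_append, ← PySem.Set.ofList_eq_foldl]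
  simp only [List.foldl_cons, List.foldl_nil, PySem.Set.add]
  have hc : (PySem.Set.ofList l).contains a = decide (a ∈ l) := by
    simp [PySem.Set.contains, PySem.Set.mem_ofList]
  rw [hc]
  by_cases h : a ∈ l <;> simp [h]

-- A's loop step over enumerate
def stepA (st : PySem.Dict Char Int × Int) (p : Int × Char) : PySem.Dict Char Int × Int :=
  if st.1.contains p.2 then
    (st.1, max st.2 (p.1 - st.1.getD p.2 0 - 1))
  else
    (st.1.insert p.2 p.1, st.2)

theorem aloopA (l : List Char) :
    (∀ c, ((PySem.List.enumerate l 0).foldl stepA (PySem.Dict.empty, -1)).1.get? c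
        = if c ∈ l then some ((fI l c : Nat) : Int) else none)
    ∧ ((PySem.List.enumerate l 0).foldl stepA (PySem.Dict.empty, -1)).2 = Mspec l := by
  induction l using List.reverseRecOn with
  | nil =>
    refine ⟨fun c => ?_, ?_⟩
    · simp [PySem.List.enumerate, PySem.Dict.get?_empty]
    · simp [PySem.List.enumerate, Mspec, PySem.Set.ofList]
  | append_singleton l a ih =>
    obtain ⟨ihd, ihm⟩ := ih
    have henum : PySem.List.enumerate (l ++ [a]) 0
        = PySem.List.enumerate l 0 ++ [((0 + l.length : Int), a)] := by
      rw [PySem.List.enumerate_append]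
      simp [PySem.List.enumerate_cons, PySem.List.enumerate_nil]
    rw [henum, List.foldl_append]
    set r := (PySem.List.enumerate l 0).foldl stepA (PySem.Dict.empty, -1) with hr
    simp only [List.foldl_cons, List.foldl_nil]
    have hcont : r.1.contains a = decide (a ∈ l) := by
      rw [PySem.Dict.contains_eq_isSome_get?, ihd a]
      by_cases h : a ∈ l <;> simp [h]
    by_cases ha : a ∈ l
    · have hcontT : r.1.contains a = true := by rw [hcont]; simp [ha]
      have hstep : stepA r ((0 + l.length : Int), a)
          = (r.1, max r.2 ((0 + l.length : Int) - r.1.getD a 0 - 1)) := by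
        simp [stepA, hcontT]
      rw [hstep]
      refine ⟨fun c => ?_, ?_⟩
      · by_cases hcl : c ∈ l
        · simp [ihd, List.mem_append, hcl, fI_append_left hcl]
        · have hca : c ≠ a := fun e => hcl (e ▸ ha)
          simp [ihd, List.mem_append, hcl, hca]
      · have hgetD : r.1.getD a 0 = ((fI l a : Nat) : Int) := by
          rw [PySem.Dict.getD_eq_get?_getD, ihd a, if_pos ha, Option.getD_some]
        simp only [hgetD, ihm]
        have hof : PySem.Set.ofList (l ++ [a]) = PySem.Set.ofList l := by
          rw [ofList_append_singleton, if_pos ha]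
        unfold Mspec
        rw [hof]
        rw [foldl_max_replace_one (PySem.Set.nodup_ofList l) ((PySem.Set.mem_ofList ..).2 ha)
          (g := fun c => (lI l c : Int) - (fI l c : Int) - 1)
          (g' := fun c => (lI (l ++ [a]) c : Int) - (fI (l ++ [a]) c : Int) - 1)
          ?_ ?_ (-1)]
        · have h1 : lI (l ++ [a]) a = l.length := lI_append_self l a
          have h2 : fI (l ++ [a]) a = fI l a := fI_append_left ha
          simp only [h1, h2]
          push_cast
          ring_nf
        · intro c hc hca
          have hcl : c ∈ l := (PySem.Set.mem_ofList ..).1 hc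
          simp only [lI_append_ne (fun e => hca e.symm), fI_append_left hcl]
        · have h1 : lI (l ++ [a]) a = l.length := lI_append_self l a
          have h2 : fI (l ++ [a]) a = fI l a := fI_append_left ha
          have h3 : lI l a < l.length := lI_lt_length ha
          simp only [h1, h2]
          have : (lI l a : Int) ≤ (l.length : Int) := by exact_mod_cast le_of_lt h3
          omega
    · have hcontF : r.1.contains a = false := by rw [hcont]; simp [ha]
      have hstep : stepA r ((0 + l.length : Int), a)
          = (r.1.insert a (0 + l.length : Int), r.2) := by
        simp [stepA, hcontF]
      rw [hstep]
      refine ⟨fun c => ?_, ?_⟩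
      · rw [PySem.Dict.get?_insert]
        by_cases hca : c = a
        · subst hca
          have hf : fI (l ++ [c]) c = l.length := by
            rw [fI_append_right ha]; simp [fI]
          simp [hf, List.mem_append]
        · rw [if_neg hca, ihd c]
          by_cases hcl : c ∈ l
          · simp [List.mem_append, hcl, fI_append_left hcl]
          · simp [List.mem_append, hcl, hca]
      · simp only [ihm]
        unfold Mspec
        have hof : PySem.Set.ofList (l ++ [a]) = PySem.Set.ofList l ++ [a] := by
          rw [ofList_append_singleton, if_neg ha]
        rw [hof, List.map_append]
        have hmap : (PySem.Set.ofList l).map (fun c => (lI (l ++ [a]) c : Int) - (fI (l ++ [a]) c : Int) - 1)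
            = (PySem.Set.ofList l).map (fun c => (lI l c : Int) - (fI l c : Int) - 1) := by
          apply List.map_congr_left
          intro c hc
          have hcl : c ∈ l := (PySem.Set.mem_ofList ..).1 hc
          have hca : a ≠ c := fun e => ha (e ▸ hcl)
          simp only [lI_append_ne hca, fI_append_left hcl]
        rw [hmap]
        have hga : (lI (l ++ [a]) a : Int) - (fI (l ++ [a]) a : Int) - 1 = -1 := by
          have h1 : lI (l ++ [a]) a = l.length := lI_append_self l a
          have h2 : fI (l ++ [a]) a = l.length := by rw [fI_append_right ha]; simp [fI]
          rw [h1, h2]; ring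
        simp only [List.map_cons, List.map_nil, hga]
        rw [List.foldl_append]
        simp only [List.foldl_cons, List.foldl_nil]
        exact (max_eq_left ((PySem.List.le_foldl_max _ _).1)).symm

theorem A_unfold (s : String) :
    maxLengthBetweenEqualCharacterTwo s
      = ((PySem.List.enumerate s.toList 0).foldl stepA (PySem.Dict.empty, -1)).2 := by
  rw [PySem.List.enumerate_eq_map_pyRange s.toList ' ', List.foldl_map]
  rfl

theorem B_eq_M (s : String) : maxLengthBetweenEqualCharacterTwo_alt s = Mspec s.toList := by
  have hmap : (PySem.Set.ofList s.toList).map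
        (fun c => PySem.Str.rfind s (String.ofList [c]) - PySem.Str.find s (String.ofList [c]) - 1)
      = (PySem.Set.ofList s.toList).map (fun c => (lI s.toList c : Int) - (fI s.toList c : Int) - 1) := by
    apply List.map_congr_left
    intro c hc
    have hcl : c ∈ s.toList := (PySem.Set.mem_ofList ..).1 hc
    rw [PySem.Str.rfind_eq, PySem.Str.find_eq]
    simp only [String.toList_ofList]
    rw [rfind_singleton hcl, find_singleton hcl]
  unfold maxLengthBetweenEqualCharacterTwo_alt Mspec
  rw [hmap]
  cases hsp : (PySem.Set.ofList s.toList).map (fun c => (lI s.toList c : Int) - (fI s.toList c : Int) - 1) with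
  | nil => simp
  | cons x t =>
    have hx : (-1 : Int) ≤ x := by
      have hmem : x ∈ x :: t := List.mem_cons_self ..
      rw [← hsp] at hmem
      obtain ⟨c, hc, hxe⟩ := List.mem_map.1 hmem
      have hcl : c ∈ s.toList := (PySem.Set.mem_ofList ..).1 hc
      have := fI_le_lI hcl
      omega
    rw [foldl_max_neg_one_cons t hx]

-- ===== VERDICT (by name: the statement is the Claim_ definition above) =====
theorem maxLengthBetweenEqualCharacterTwo_spec : Claim_equal_maxLengthBetweenEqualCharacterTwo := by
  intro s _
  show _ = _
  rw [A_unfold, (aloopA s.toList).2, B_eq_M]
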